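-- pv_equiv track=rewrite | github.com/karthikradhakrishnan96/capstone | baseline_clean/bert_cwa3.py | dialogBatch2UtteranceBatch
-- ===== SOURCE A (Python) =====
-- def dialogBatch2UtteranceBatch(dialog_batch):
--     utt_tuples = []  # will store tuples of (utterance, original position in batch, original position in dialog)
--     for batch_idx in range(len(dialog_batch)):
--         dialog = dialog_batch[batch_idx]
--         for dialog_idx in range(len(dialog)):
--             utterance = dialog[dialog_idx]
--             utt_tuples.append((utterance, batch_idx, dialog_idx))
--     # sort the utterances in descending order of length, to remain consistent with pytorch padding requirements
--     utt_tuples.sort(key=lambda x: len(x[0]), reverse=True)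
--     # return the utterances, original batch indices, and original dialog indices as separate lists
--     utt_batch = [u[0] for u in utt_tuples]
--     batch_indices = [u[1] for u in utt_tuples]
--     dialog_indices = [u[2] for u in utt_tuples]
--     return utt_batch, batch_indices, dialog_indices
-- ===== SOURCE B (Python) =====
-- def dialogBatch2UtteranceBatch(dialog_batch):
--     # Bucket (counting) sort by utterance length: group utterances into
--     # length-keyed buckets in arrival order, then emit buckets from the
--     # longest length down to 0.  No comparison sort at all; stability within a
--     # bucket is arrival order, which matches a stable descending length sort.
--     buckets = {}  # length -> [(utterance, batch_idx, dialog_idx), ...] in arrival order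
--     max_len = 0
--     for batch_idx, dialog in enumerate(dialog_batch):
--         for dialog_idx, utterance in enumerate(dialog):
--             n = len(utterance)
--             buckets.setdefault(n, []).append((utterance, batch_idx, dialog_idx))
--             if n > max_len:
--                 max_len = n
--     utt_batch = []
--     batch_indices = []
--     dialog_indices = []
--     for n in range(max_len, -1, -1):
--         for utterance, batch_idx, dialog_idx in buckets.get(n, []):
--             utt_batch.append(utterance)
--             batch_indices.append(batch_idx)
--             dialog_indices.append(dialog_idx)
--     return utt_batch, batch_indices, dialog_indices
-- ===== Notes on version B (the rewrite author's own statement) =====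
-- stated objective: alternative
-- what changed: B replaces A's flatten-then-comparison-sort (sort tuples by length, reverse=True) with a bucket/counting sort: utterances are grouped into length-keyed buckets in arrival order and emitted from the maximum length down to 0, so no comparison sort is performed at all.
import Mathlib
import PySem

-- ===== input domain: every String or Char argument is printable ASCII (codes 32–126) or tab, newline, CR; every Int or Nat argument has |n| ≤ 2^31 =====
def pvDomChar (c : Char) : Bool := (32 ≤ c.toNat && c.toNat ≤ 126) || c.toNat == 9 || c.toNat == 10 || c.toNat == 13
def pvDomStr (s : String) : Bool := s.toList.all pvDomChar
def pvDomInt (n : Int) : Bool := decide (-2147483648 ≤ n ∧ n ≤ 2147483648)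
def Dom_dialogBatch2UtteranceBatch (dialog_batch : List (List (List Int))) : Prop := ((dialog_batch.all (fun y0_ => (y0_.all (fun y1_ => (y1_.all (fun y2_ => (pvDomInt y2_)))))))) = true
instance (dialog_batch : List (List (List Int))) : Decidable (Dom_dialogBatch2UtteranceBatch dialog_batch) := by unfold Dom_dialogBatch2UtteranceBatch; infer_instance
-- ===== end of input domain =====

-- B replaces A's flatten + comparison sort (stable sort by length, reverse=True) with a
-- bucket/counting sort: length-keyed buckets filled in arrival order, emitted from the
-- maximum length down to 0 (different algorithm, same exact output).

-- ===== PORT A =====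
def dialogBatch2UtteranceBatch (dialog_batch : List (List (List Int))) : List (List Int) × List Int × List Int :=
  let utt_tuples : List (List Int × Int × Int) :=
    (PySem.List.pyRange 0 (dialog_batch.length : Int) 1).foldl (fun acc batch_idx =>
      let dialog := PySem.List.pyGetD dialog_batch batch_idx []
      (PySem.List.pyRange 0 (dialog.length : Int) 1).foldl (fun acc2 dialog_idx =>
        let utterance := PySem.List.pyGetD dialog dialog_idx []
        acc2 ++ [(utterance, batch_idx, dialog_idx)]) acc) []
  let sortedTuples := PySem.List.sorted utt_tuples (fun x => (x.1.length : Int)) true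
  (sortedTuples.map (fun u => u.1),
   sortedTuples.map (fun u => u.2.1),
   sortedTuples.map (fun u => u.2.2))

-- ===== PORT B =====
def dialogBatch2UtteranceBatch_alt (dialog_batch : List (List (List Int))) : List (List Int) × List Int × List Int :=
  -- buckets: length -> triples in arrival order (setdefault+append = modify with default); max_len tracked alongside
  let st : PySem.Dict Int (List (List Int × Int × Int)) × Int :=
    (PySem.List.enumerate dialog_batch 0).foldl (fun st p =>
      (PySem.List.enumerate p.2 0).foldl (fun st q =>
        let n : Int := (q.2.length : Int)
        (st.1.modify n [] (fun l => l ++ [(q.2, p.1, q.1)]),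
         if st.2 < n then n else st.2)) st)
      (⟨[]⟩, 0)
  let buckets := st.1
  let max_len := st.2
  (PySem.List.pyRange max_len (-1) (-1)).foldl (fun acc n =>
    (buckets.getD n []).foldl (fun acc t =>
      (acc.1 ++ [t.1], acc.2.1 ++ [t.2.1], acc.2.2 ++ [t.2.2])) acc)
    ([], [], [])

-- ===== PRECONDITION & SPEC =====
def Spec_dialogBatch2UtteranceBatch (dialog_batch : List (List (List Int))) (out : List (List Int) × List Int × List Int) : Prop := out = dialogBatch2UtteranceBatch_alt dialog_batch
instance (dialog_batch : List (List (List Int))) (out : List (List Int) × List Int × List Int) : Decidable (Spec_dialogBatch2UtteranceBatch dialog_batch out) := by unfold Spec_dialogBatch2UtteranceBatch; infer_instance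

-- ===== CLAIM (what is proved, stated in full; the proofs are below) =====
def Claim_equal_dialogBatch2UtteranceBatch : Prop := ∀ (dialog_batch : List (List (List Int))), Dom_dialogBatch2UtteranceBatch dialog_batch → Spec_dialogBatch2UtteranceBatch dialog_batch (dialogBatch2UtteranceBatch dialog_batch)

-- ===== LEMMAS AND PROOFS =====

-- the flattened tuples, in arrival order (common to both proofs)
def pvTuples (dialog_batch : List (List (List Int))) : List (List Int × Int × Int) :=
  (PySem.List.enumerate dialog_batch 0).flatMap (fun p =>
    (PySem.List.enumerate p.2 0).map (fun q => (q.2, p.1, q.1)))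

-- the sort key
def pvKey (u : List Int × Int × Int) : Int := (u.1.length : Int)

-- ---- A's flatten loop produces pvTuples ----
theorem pv_flatMap_single {α β : Type} (l : List α) (g : α → β) :
    l.flatMap (fun x => [g x]) = l.map g := by
  induction l <;> simp [*]

theorem pv_A_tuples (dialog_batch : List (List (List Int))) :
    (PySem.List.pyRange 0 (dialog_batch.length : Int) 1).foldl (fun acc batch_idx =>
      let dialog := PySem.List.pyGetD dialog_batch batch_idx []
      (PySem.List.pyRange 0 (dialog.length : Int) 1).foldl (fun acc2 dialog_idx =>
        let utterance := PySem.List.pyGetD dialog dialog_idx []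
        acc2 ++ [(utterance, batch_idx, dialog_idx)]) acc) []
    = pvTuples dialog_batch := by
  simp only [PySem.List.foldl_append_eq_flatMap, pvTuples]
  rw [PySem.List.enumerate_eq_map_pyRange dialog_batch []]
  simp [pv_flatMap_single, List.flatMap_map,
        PySem.List.enumerate_eq_map_pyRange _ ([] : List Int), Function.comp_def,
        PySem.List.len_eq]

-- ---- B's bucket-filling loop, characterised ----

-- the pair-state fold splits into two independent folds
theorem pv_fold_pair (T : List (List Int × Int × Int))
    (d : PySem.Dict Int (List (List Int × Int × Int))) (m : Int) :
    T.foldl (fun st u =>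
        (st.1.modify (pvKey u) [] (fun l => l ++ [u]),
         if st.2 < pvKey u then pvKey u else st.2)) (d, m)
    = (T.foldl (fun d u => d.modify (pvKey u) [] (fun l => l ++ [u])) d,
       T.foldl (fun m u => if m < pvKey u then pvKey u else m) m) := by
  induction T generalizing d m with
  | nil => rfl
  | cons u T ih => simp [List.foldl_cons, ih]

-- bucket contents: getD after the fold is the filtered arrival-order list
theorem pv_bucket_getD (T : List (List Int × Int × Int))
    (d : PySem.Dict Int (List (List Int × Int × Int))) (n : Int) :
    (T.foldl (fun d u => d.modify (pvKey u) [] (fun l => l ++ [u])) d).getD n []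
    = d.getD n [] ++ T.filter (fun u => decide (pvKey u = n)) := by
  induction T generalizing d with
  | nil => simp
  | cons u T ih =>
    simp only [List.foldl_cons, List.filter_cons]
    rw [ih]
    by_cases h : pvKey u = n
    · simp [PySem.Dict.modify, h]
    · simp [PySem.Dict.modify, PySem.Dict.getD_insert, h, Ne.symm h]

-- the running maximum bounds every key, and its seed
theorem pv_maxfold_le (T : List (List Int × Int × Int)) (m : Int) :
    m ≤ T.foldl (fun m u => if m < pvKey u then pvKey u else m) m := by
  induction T generalizing m with
  | nil => simp
  | cons u T ih =>
    simp only [List.foldl_cons]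
    refine le_trans ?_ (ih _)
    split <;> omega

theorem pv_maxfold_bound (T : List (List Int × Int × Int)) (m : Int) :
    ∀ u ∈ T, pvKey u ≤ T.foldl (fun m u => if m < pvKey u then pvKey u else m) m := by
  induction T generalizing m with
  | nil => simp
  | cons v T ih =>
    intro u hu
    rcases List.mem_cons.mp hu with hu | hu
    · subst hu
      simp only [List.foldl_cons]
      refine le_trans ?_ (pv_maxfold_le T _)
      split <;> omega
    · exact ih _ u hu

-- ---- descending range [M, M-1, …, 0] ----
theorem pv_pyRange_desc (M : Int) (hM : 0 ≤ M) :
    PySem.List.pyRange M (-1) (-1) = (List.range (M.toNat + 1)).map (fun k : Nat => M - (k : Int)) := by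
  unfold PySem.List.pyRange
  have h1 : (-1 : Int) < M := by omega
  simp only [if_neg (by norm_num : ¬ (-1 : Int) = 0), if_neg (by omega : ¬ (0:Int) < -1), if_pos h1]
  have h2 : (M - -1 + - -1 - 1) / - -1 = M + 1 := by norm_num
  rw [h2]
  have h3 : (M + 1).toNat = M.toNat + 1 := by omega
  rw [h3]
  refine List.map_congr_left (fun k _ => by ring)

-- ---- stable descending sort = buckets, generic in the bucket list ----

-- insertBy skips a prefix it never inserts before
theorem pv_insertBy_append (before : List Int × Int × Int → List Int × Int × Int → Bool)
    (x : List Int × Int × Int) (us vs : List (List Int × Int × Int))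
    (h : ∀ y ∈ us, before x y = false) :
    PySem.List.insertBy before x (us ++ vs) = us ++ PySem.List.insertBy before x vs := by
  induction us with
  | nil => simp
  | cons u us ih =>
    simp only [List.cons_append, PySem.List.insertBy, h u (by simp)]
    simp only [Bool.false_eq_true, if_false, List.cons.injEq, true_and]
    exact ih (fun y hy => h y (by simp [hy]))

-- split off the maximal bucket of a stable descending sort
theorem pv_sorted_rev_split (xs : List (List Int × Int × Int)) (M : Int)
    (h : ∀ x ∈ xs, pvKey x ≤ M) :
    PySem.List.sorted xs pvKey true
    = xs.filter (fun x => decide (pvKey x = M))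
      ++ PySem.List.sorted (xs.filter (fun x => decide (pvKey x ≠ M))) pvKey true := by
  induction xs using List.reverseRecOn with
  | nil => rfl
  | append_singleton xs a ih =>
    have hxs : ∀ x ∈ xs, pvKey x ≤ M := fun x hx => h x (by simp [hx])
    have ha : pvKey a ≤ M := h a (by simp)
    have hrest : ∀ y ∈ PySem.List.sorted (xs.filter (fun x => decide (pvKey x ≠ M))) pvKey true,
        pvKey y < M := by
      intro y hy
      rw [PySem.List.mem_sorted] at hy
      have h1 := List.of_mem_filter hy
      have h2 := hxs y (List.mem_of_mem_filter hy)
      simp only [decide_eq_true_eq, ne_eq] at h1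
      omega
    have hskip : ∀ y ∈ xs.filter (fun x => decide (pvKey x = M)),
        (fun a b => decide (pvKey b < pvKey a)) a y = false := by
      intro y hy
      have h1 := List.of_mem_filter hy
      simp only [decide_eq_true_eq] at h1
      simp only [decide_eq_false_iff_not]
      omega
    rw [PySem.List.sorted_rev_eq_foldl_insertBy, List.foldl_append, List.foldl_cons,
        List.foldl_nil, ← PySem.List.sorted_rev_eq_foldl_insertBy, ih hxs,
        pv_insertBy_append _ _ _ _ hskip]
    by_cases hM : pvKey a = M
    · have hfilter1 : (xs ++ [a]).filter (fun x => decide (pvKey x = M))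
          = xs.filter (fun x => decide (pvKey x = M)) ++ [a] := by
        simp [List.filter_append, hM]
      have hfilter2 : (xs ++ [a]).filter (fun x => decide (pvKey x ≠ M))
          = xs.filter (fun x => decide (pvKey x ≠ M)) := by
        simp [List.filter_append, hM]
      rw [hfilter1, hfilter2, List.append_assoc]
      congr 1
      -- insertBy puts a at the head: every element of the tail bucket has a smaller key
      cases hR : PySem.List.sorted (xs.filter (fun x => decide (pvKey x ≠ M))) pvKey true with
      | nil => rfl
      | cons r R =>
        have hr : pvKey r < M := hrest r (by rw [hR]; simp)
        simp [PySem.List.insertBy, hM, hr]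
    · have hfilter1 : (xs ++ [a]).filter (fun x => decide (pvKey x = M))
          = xs.filter (fun x => decide (pvKey x = M)) := by
        simp [List.filter_append, hM]
      have hfilter2 : (xs ++ [a]).filter (fun x => decide (pvKey x ≠ M))
          = xs.filter (fun x => decide (pvKey x ≠ M)) ++ [a] := by
        simp [List.filter_append, hM]
      rw [hfilter1, hfilter2]
      congr 1
      conv_rhs => rw [PySem.List.sorted_rev_eq_foldl_insertBy, List.foldl_append,
        List.foldl_cons, List.foldl_nil]
      rw [PySem.List.sorted_rev_eq_foldl_insertBy]

-- stable descending sort equals concatenation of buckets along a strictly decreasing key list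
theorem pv_sorted_rev_buckets (Ls : List Int) (hLs : Ls.Pairwise (fun a b => b < a)) :
    ∀ xs : List (List Int × Int × Int), (∀ x ∈ xs, pvKey x ∈ Ls) →
    PySem.List.sorted xs pvKey true
    = Ls.flatMap (fun n => xs.filter (fun x => decide (pvKey x = n))) := by
  induction Ls with
  | nil =>
    intro xs hxs
    cases xs with
    | nil => rfl
    | cons x xs => exact absurd (hxs x (by simp)) (by simp)
  | cons L Ls ih =>
    intro xs hxs
    have hlt : ∀ n ∈ Ls, n < L := fun n hn => (List.pairwise_cons.mp hLs).1 n hn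
    have hbound : ∀ x ∈ xs, pvKey x ≤ L := by
      intro x hx
      rcases List.mem_cons.mp (hxs x hx) with hm | hm
      · omega
      · exact le_of_lt (hlt _ hm)
    rw [pv_sorted_rev_split xs L hbound, List.flatMap_cons]
    congr 1
    rw [ih (List.pairwise_cons.mp hLs).2 _ (by
      intro x hx
      have h1 := List.of_mem_filter hx
      have h2 := hxs x (List.mem_of_mem_filter hx)
      simp only [decide_eq_true_eq, ne_eq] at h1
      rcases List.mem_cons.mp h2 with hm | hm
      · exact absurd hm h1
      · exact hm)]
    refine List.flatMap_congr (fun n hn => ?_)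
    rw [List.filter_filter]
    refine List.filter_congr (fun x _ => ?_)
    have hnL : n ≠ L := by have := hlt n hn; omega
    by_cases hxn : pvKey x = n
    · simp [hxn, hnL]
    · simp [hxn]

-- the three parallel appends in B's gather loop are three flatMaps
theorem pv_foldl_triple_append {α β γ δ : Type} (xs : List α)
    (g1 : α → List β) (g2 : α → List γ) (g3 : α → List δ) (t : List β × List γ × List δ) :
    xs.foldl (fun acc x => (acc.1 ++ g1 x, acc.2.1 ++ g2 x, acc.2.2 ++ g3 x)) t
      = (t.1 ++ xs.flatMap g1, t.2.1 ++ xs.flatMap g2, t.2.2 ++ xs.flatMap g3) := by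
  induction xs generalizing t with
  | nil => simp
  | cons x xs ih => simp [ih]

-- B's nested enumerate fold is a fold over the flattened tuples
theorem pv_B_state (dialog_batch : List (List (List Int))) :
    (PySem.List.enumerate dialog_batch 0).foldl (fun st p =>
      (PySem.List.enumerate p.2 0).foldl (fun st q =>
        ((st.1.modify ((q.2.length : Int)) [] (fun l => l ++ [(q.2, p.1, q.1)]),
          if st.2 < ((q.2.length : Int)) then ((q.2.length : Int)) else st.2)
         : PySem.Dict Int (List (List Int × Int × Int)) × Int)) st) (⟨[]⟩, 0)
    = (pvTuples dialog_batch).foldl (fun st u =>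
        (st.1.modify (pvKey u) [] (fun l => l ++ [u]),
         if st.2 < pvKey u then pvKey u else st.2)) (⟨[]⟩, 0) := by
  rw [pvTuples, List.foldl_flatMap]
  simp only [List.foldl_map]
  rfl

-- ===== VERDICT (by name: the statement is the Claim_ definition above) =====
theorem dialogBatch2UtteranceBatch_spec : Claim_equal_dialogBatch2UtteranceBatch := by
  intro db _
  unfold Spec_dialogBatch2UtteranceBatch dialogBatch2UtteranceBatch dialogBatch2UtteranceBatch_alt
  simp only [pv_A_tuples]
  rw [pv_B_state db, pv_fold_pair]
  set T := pvTuples db with hT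
  set D := T.foldl (fun d u => d.modify (pvKey u) [] (fun l => l ++ [u]))
    (PySem.Dict.mk ([] : List (Int × List (List Int × Int × Int)))) with hD
  set M := T.foldl (fun m u => if m < pvKey u then pvKey u else m) 0 with hM
  have hM0 : 0 ≤ M := pv_maxfold_le T 0
  have hMb : ∀ u ∈ T, pvKey u ≤ M := pv_maxfold_bound T 0
  set Ls := PySem.List.pyRange M (-1) (-1) with hLs
  have hLsEq : Ls = (List.range (M.toNat + 1)).map (fun k : Nat => M - (k : Int)) :=
    pv_pyRange_desc M hM0
  have hpair : Ls.Pairwise (fun a b => b < a) := by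
    rw [hLsEq, List.pairwise_map]
    exact List.pairwise_lt_range.imp (fun h => by omega)
  have hcov : ∀ x ∈ T, pvKey x ∈ Ls := by
    intro x hx
    rw [hLsEq, List.mem_map]
    have h0 : 0 ≤ pvKey x := Int.natCast_nonneg _
    have hb := hMb x hx
    exact ⟨(M - pvKey x).toNat, List.mem_range.mpr (by omega), by omega⟩
  have hsort : PySem.List.sorted T (fun x => ((x.1.length : Int))) true
      = Ls.flatMap (fun n => T.filter (fun x => decide (pvKey x = n))) :=
    pv_sorted_rev_buckets Ls hpair T hcov
  rw [hsort]
  -- gather: inner bucket fold, then outer range fold, are flatMaps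
  have hinner : ∀ (n : Int) (acc : List (List Int) × List Int × List Int),
      (D.getD n []).foldl
        (fun acc t => (acc.1 ++ [t.1], acc.2.1 ++ [t.2.1], acc.2.2 ++ [t.2.2])) acc
      = (acc.1 ++ (T.filter (fun x => decide (pvKey x = n))).map (fun t => t.1),
         acc.2.1 ++ (T.filter (fun x => decide (pvKey x = n))).map (fun t => t.2.1),
         acc.2.2 ++ (T.filter (fun x => decide (pvKey x = n))).map (fun t => t.2.2)) := by
    intro n acc
    rw [pv_foldl_triple_append _ (fun t : List Int × Int × Int => [t.1])
      (fun t : List Int × Int × Int => [t.2.1]) (fun t : List Int × Int × Int => [t.2.2])]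
    rw [hD, pv_bucket_getD T _ n]
    simp [pv_flatMap_single, PySem.Dict.getD, PySem.Dict.get?]
  have houter : Ls.foldl (fun acc n =>
      (D.getD n []).foldl
        (fun acc t => (acc.1 ++ [t.1], acc.2.1 ++ [t.2.1], acc.2.2 ++ [t.2.2])) acc)
      ([], [], [])
      = (Ls.flatMap (fun n => (T.filter (fun x => decide (pvKey x = n))).map (fun t => t.1)),
         Ls.flatMap (fun n => (T.filter (fun x => decide (pvKey x = n))).map (fun t => t.2.1)),
         Ls.flatMap (fun n => (T.filter (fun x => decide (pvKey x = n))).map (fun t => t.2.2))) := by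
    rw [show (fun (acc : List (List Int) × List Int × List Int) (n : Int) =>
        (D.getD n []).foldl
          (fun acc t => (acc.1 ++ [t.1], acc.2.1 ++ [t.2.1], acc.2.2 ++ [t.2.2])) acc)
      = (fun acc n =>
        (acc.1 ++ (T.filter (fun x => decide (pvKey x = n))).map (fun t => t.1),
         acc.2.1 ++ (T.filter (fun x => decide (pvKey x = n))).map (fun t => t.2.1),
         acc.2.2 ++ (T.filter (fun x => decide (pvKey x = n))).map (fun t => t.2.2)))
      from funext fun acc => funext fun n => hinner n acc]
    rw [pv_foldl_triple_append]
    simp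
  rw [houter]
  simp [List.map_flatMap]
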